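-- pv_equiv track=rewrite | github.com/TriumphLLC/FashionProject | modules/operators/tools/points/point_on_line.py | _mouse_not_in_square
-- ===== SOURCE A (Python) =====
-- from functools import reduce
--
-- def _mouse_not_in_square(mouse_coords_3, locs):
--   max_x = reduce(lambda r, i: i if i > r else r, [loc[0] for loc in locs])
--   max_y = reduce(lambda r, i: i if i > r else r, [loc[1] for loc in locs])
--   min_x = reduce(lambda r, i: i if i < r else r, [loc[0] for loc in locs])
--   min_y = reduce(lambda r, i: i if i < r else r, [loc[1] for loc in locs])
--   return (
--     (mouse_coords_3[0] > max_x and mouse_coords_3[1] > max_y)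
--     or
--     (mouse_coords_3[0] < min_x and mouse_coords_3[1] < min_y)
--   )
-- ===== SOURCE B (Python) =====
-- def _mouse_not_in_square(mouse_coords_3, locs):
--     max_x = min_x = locs[0][0]
--     max_y = min_y = locs[0][1]
--     for loc in locs[1:]:
--         x, y = loc[0], loc[1]
--         if x > max_x:
--             max_x = x
--         if y > max_y:
--             max_y = y
--         if x < min_x:
--             min_x = x
--         if y < min_y:
--             min_y = y
--     return (
--         (mouse_coords_3[0] > max_x and mouse_coords_3[1] > max_y)
--         or
--         (mouse_coords_3[0] < min_x and mouse_coords_3[1] < min_y)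
--     )
-- ===== Notes on version B (the rewrite author's own statement) =====
-- stated objective: alternative
-- what changed: One single pass over locs maintaining four running extrema replaces A's four separate reduce-scans over four freshly built comprehension lists (same asymptotic cost).
-- outside the precondition, e.g. on _mouse_not_in_square((1,), [(1, 1)]): A returns False, B returns False
import Mathlib
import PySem

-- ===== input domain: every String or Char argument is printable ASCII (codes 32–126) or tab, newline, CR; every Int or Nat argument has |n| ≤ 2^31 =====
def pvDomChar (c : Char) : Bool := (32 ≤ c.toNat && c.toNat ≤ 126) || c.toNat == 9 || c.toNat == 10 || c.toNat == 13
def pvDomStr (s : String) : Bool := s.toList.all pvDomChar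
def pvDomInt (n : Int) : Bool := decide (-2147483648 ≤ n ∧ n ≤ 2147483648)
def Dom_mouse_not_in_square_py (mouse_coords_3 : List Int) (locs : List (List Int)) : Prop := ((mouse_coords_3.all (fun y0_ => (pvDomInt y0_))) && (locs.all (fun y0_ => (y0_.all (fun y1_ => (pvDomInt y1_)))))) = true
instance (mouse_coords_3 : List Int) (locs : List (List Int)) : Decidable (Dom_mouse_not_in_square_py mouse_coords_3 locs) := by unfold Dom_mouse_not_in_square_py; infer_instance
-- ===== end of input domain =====

-- B replaces A's four reduce-scans over four comprehension lists by one single pass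
-- keeping four running extrema (objective: alternative decomposition, same asymptotic cost).

-- ===== PORT A =====
-- reduce(f, l): none on the empty list (TypeError), otherwise fold over the tail
def pvReduce (f : Int → Int → Int) : List Int → Option Int
  | [] => none
  | x :: xs => some (xs.foldl f x)

-- [loc[j] for loc in locs]: none if some loc[j] raises IndexError
def pvCol (locs : List (List Int)) (j : Int) : Option (List Int) :=
  locs.mapM (fun loc => PySem.List.pyGet? loc j)

def mouse_not_in_square_py (mouse_coords_3 : List Int) (locs : List (List Int)) : Bool :=
  (do
    let xs0 ← pvCol locs 0
    let max_x ← pvReduce (fun r i => if i > r then i else r) xs0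
    let ys0 ← pvCol locs 1
    let max_y ← pvReduce (fun r i => if i > r then i else r) ys0
    let xs1 ← pvCol locs 0
    let min_x ← pvReduce (fun r i => if i < r then i else r) xs1
    let ys1 ← pvCol locs 1
    let min_y ← pvReduce (fun r i => if i < r then i else r) ys1
    let m0 ← PySem.List.pyGet? mouse_coords_3 0
    let m1 ← PySem.List.pyGet? mouse_coords_3 1
    pure ((m0 > max_x && m1 > max_y) || (m0 < min_x && m1 < min_y))).getD false

-- ===== PORT B =====
-- one loop step: update the four running extrema from loc[0], loc[1]
-- (loc[j] fetched with pyGet?; .getD 0 is never hit inside Pre_, where every loc has length ≥ 2)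
def pvStep (s : Int × Int × Int × Int) (loc : List Int) : Int × Int × Int × Int :=
  let x := (PySem.List.pyGet? loc 0).getD 0
  let y := (PySem.List.pyGet? loc 1).getD 0
  let (max_x, max_y, min_x, min_y) := s
  let max_x := if x > max_x then x else max_x
  let max_y := if y > max_y then y else max_y
  let min_x := if x < min_x then x else min_x
  let min_y := if y < min_y then y else min_y
  (max_x, max_y, min_x, min_y)

def mouse_not_in_square_py_alt (mouse_coords_3 : List Int) (locs : List (List Int)) : Bool :=
  match locs with
  | [] => false
  | first :: rest =>
    match PySem.List.pyGet? first 0, PySem.List.pyGet? first 1,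
          PySem.List.pyGet? mouse_coords_3 0, PySem.List.pyGet? mouse_coords_3 1 with
    | some x0, some y0, some m0, some m1 =>
      let (max_x, max_y, min_x, min_y) := rest.foldl pvStep (x0, y0, x0, y0)
      (m0 > max_x && m1 > max_y) || (m0 < min_x && m1 < min_y)
    | _, _, _, _ => false

-- ===== PRECONDITION & SPEC =====
-- Pre_ excludes the inputs on which A raises (empty locs: TypeError from reduce; a loc or
-- mouse_coords_3 too short: IndexError).  It also requires mouse_coords_3 to have ≥ 2 entries
-- even though, when the mouse x lies inside the x-range, A's short-circuit returns False
-- without reading index 1: the natural domain is a full mouse coordinate, and whether a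
-- 1-entry mouse list raises depends on the coordinate values, not on the input's shape.
def Pre_mouse_not_in_square_py (mouse_coords_3 : List Int) (locs : List (List Int)) : Prop :=
  locs ≠ [] ∧ (∀ loc ∈ locs, 2 ≤ loc.length) ∧ 2 ≤ mouse_coords_3.length
instance (mouse_coords_3 : List Int) (locs : List (List Int)) : Decidable (Pre_mouse_not_in_square_py mouse_coords_3 locs) := by unfold Pre_mouse_not_in_square_py; infer_instance

def pvWitness_mouse_not_in_square_py : List Int × List (List Int) := ([5, 5, 0], [[1, 2], [3, 1]])

def Spec_mouse_not_in_square_py (mouse_coords_3 : List Int) (locs : List (List Int)) (out : Bool) : Prop := out = mouse_not_in_square_py_alt mouse_coords_3 locs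
instance (mouse_coords_3 : List Int) (locs : List (List Int)) (out : Bool) : Decidable (Spec_mouse_not_in_square_py mouse_coords_3 locs out) := by unfold Spec_mouse_not_in_square_py; infer_instance

-- ===== CLAIM (what is proved, stated in full; the proofs are below) =====
def Claim_equal_mouse_not_in_square_py : Prop := ∀ (mouse_coords_3 : List Int) (locs : List (List Int)), Dom_mouse_not_in_square_py mouse_coords_3 locs → Pre_mouse_not_in_square_py mouse_coords_3 locs → Spec_mouse_not_in_square_py mouse_coords_3 locs (mouse_not_in_square_py mouse_coords_3 locs)

-- ===== LEMMAS AND PROOFS =====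

-- loc[j] for j = 0, 1 succeeds on a list of length ≥ 2
theorem pvGet0_of_len (loc : List Int) (h : 2 ≤ loc.length) :
    PySem.List.pyGet? loc 0 = some ((PySem.List.pyGet? loc 0).getD 0) := by
  match loc with
  | a :: _ => simp
  | [] => simp at h

theorem pvGet1_of_len (loc : List Int) (h : 2 ≤ loc.length) :
    PySem.List.pyGet? loc 1 = some ((PySem.List.pyGet? loc 1).getD 0) := by
  match loc with
  | a :: b :: t =>
    have hb : PySem.List.pyGet? (a :: b :: t) (1 : Int) = some b := by
      simp [PySem.List.pyGet?, PySem.List.pyIdx?]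
    rw [hb]
    rfl
  | [] => simp at h
  | [a] => simp at h

-- column extraction succeeds and yields the getD values
theorem pvCol_eq (locs : List (List Int)) (j : Int) (hj : j = 0 ∨ j = 1)
    (h : ∀ loc ∈ locs, 2 ≤ loc.length) :
    pvCol locs j = some (locs.map (fun loc => (PySem.List.pyGet? loc j).getD 0)) := by
  induction locs with
  | nil => simp [pvCol]
  | cons a l ih =>
    have ha : PySem.List.pyGet? a j = some ((PySem.List.pyGet? a j).getD 0) := by
      rcases hj with rfl | rfl
      · exact pvGet0_of_len a (h a (by simp))
      · exact pvGet1_of_len a (h a (by simp))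
    have ihl := ih (fun loc hm => h loc (by simp [hm]))
    simp only [pvCol, List.mapM_cons] at *
    rw [ha, ihl]
    rfl

-- the 4-tuple fold computes the four independent folds of A at once
theorem pvStep_foldl (rest : List (List Int)) (a b c d : Int) :
    rest.foldl pvStep (a, b, c, d) =
      ((rest.map (fun loc => (PySem.List.pyGet? loc 0).getD 0)).foldl (fun r i => if i > r then i else r) a,
       (rest.map (fun loc => (PySem.List.pyGet? loc 1).getD 0)).foldl (fun r i => if i > r then i else r) b,
       (rest.map (fun loc => (PySem.List.pyGet? loc 0).getD 0)).foldl (fun r i => if i < r then i else r) c,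
       (rest.map (fun loc => (PySem.List.pyGet? loc 1).getD 0)).foldl (fun r i => if i < r then i else r) d) := by
  induction rest generalizing a b c d with
  | nil => simp
  | cons loc l ih =>
    simp only [List.foldl_cons, List.map_cons]
    rw [← ih]
    rfl

-- ===== VERDICT (by name: the statement is the Claim_ definition above) =====
theorem mouse_not_in_square_py_spec : Claim_equal_mouse_not_in_square_py := by
  intro m locs _ hpre
  obtain ⟨hne, hlen, hm⟩ := hpre
  unfold Spec_mouse_not_in_square_py
  match locs, hne with
  | first :: rest, _ =>
    obtain ⟨x0, hx0⟩ : ∃ v, PySem.List.pyGet? first 0 = some v :=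
      ⟨_, pvGet0_of_len first (hlen first (by simp))⟩
    obtain ⟨y0, hy0⟩ : ∃ v, PySem.List.pyGet? first 1 = some v :=
      ⟨_, pvGet1_of_len first (hlen first (by simp))⟩
    obtain ⟨m0, hm0⟩ : ∃ v, PySem.List.pyGet? m 0 = some v := ⟨_, pvGet0_of_len m hm⟩
    obtain ⟨m1, hm1⟩ : ∃ v, PySem.List.pyGet? m 1 = some v := ⟨_, pvGet1_of_len m hm⟩
    have hc0 := pvCol_eq (first :: rest) 0 (Or.inl rfl) hlen
    have hc1 := pvCol_eq (first :: rest) 1 (Or.inr rfl) hlen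
    unfold mouse_not_in_square_py mouse_not_in_square_py_alt
    simp only [hc0, hc1, hx0, hy0, hm0, hm1, List.map_cons, pvReduce, Option.bind_some,
      bind, pure, Option.getD_some, pvStep_foldl]
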